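-- pv_equiv track=rewrite | github.com/Darknet500/Data-Engineering-a-gyakorlatban-HF | scripts/load/create_views.py | split_sql
-- ===== SOURCE A (Python) =====
-- def split_sql(sql: str) -> list[str]:
--     statements: list[str] = []
--     current: list[str] = []
--     in_single_quote = False
--     for char in sql:
--         if char == "'":
--             in_single_quote = not in_single_quote
--         if char == ";" and not in_single_quote:
--             statement = "".join(current).strip()
--             if statement:
--                 statements.append(statement)
--             current = []
--         else:
--             current.append(char)
--     tail = "".join(current).strip()
--     if tail:
--         statements.append(tail)
--     return statements
-- ===== SOURCE B (Python) =====
-- def split_sql(sql: str) -> list[str]: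
--     # pass 1: indices of semicolons outside single quotes
--     cuts: list[int] = []
--     in_q = False
--     for i, ch in enumerate(sql):
--         if ch == "'":
--             in_q = not in_q
--         elif ch == ";" and not in_q:
--             cuts.append(i)
--     # pass 2: slice between delimiters
--     parts: list[str] = []
--     prev = 0
--     for idx in cuts:
--         parts.append(sql[prev:idx])
--         prev = idx + 1
--     parts.append(sql[prev:])
--     out: list[str] = []
--     for p in parts:
--         s = p.strip()
--         if s:
--             out.append(s)
--     return out
-- ===== Notes on version B (the rewrite author's own statement) =====
-- stated objective: alternative
-- what changed: A accumulates characters into a growing buffer and flushes it at each outside-quote semicolon; B instead makes two passes: it first collects the index table of outside-quote semicolons, then slices the string between consecutive indices and finally strips/filters the slices.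
import Mathlib
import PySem

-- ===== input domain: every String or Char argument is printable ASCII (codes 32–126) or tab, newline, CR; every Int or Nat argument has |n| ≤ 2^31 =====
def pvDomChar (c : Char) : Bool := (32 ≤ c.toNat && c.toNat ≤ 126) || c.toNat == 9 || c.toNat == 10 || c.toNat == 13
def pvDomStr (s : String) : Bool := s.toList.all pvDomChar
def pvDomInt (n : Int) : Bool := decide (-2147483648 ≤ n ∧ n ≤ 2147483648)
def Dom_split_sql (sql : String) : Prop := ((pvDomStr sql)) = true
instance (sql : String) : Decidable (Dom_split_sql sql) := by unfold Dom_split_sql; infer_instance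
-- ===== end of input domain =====

-- B replaces A's accumulating character buffer by a two-pass index-table decomposition
-- (collect the outside-quote semicolon positions, then slice between them); objective: alternative.

-- ===== PORT A =====
-- one iteration of A's for-loop; state = (statements, current, in_single_quote)
def splitA_step (st : List String × List Char × Bool) (c : Char) : List String × List Char × Bool :=
  let inq := if c = '\'' then !st.2.2 else st.2.2
  if c = ';' ∧ inq = false then
    let statement := PySem.Chars.strip st.2.1
    ((if statement = [] then st.1 else st.1 ++ [String.ofList statement]), [], inq)
  else
    (st.1, st.2.1 ++ [c], inq)

def split_sql (sql : String) : List String :=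
  let st := sql.toList.foldl splitA_step ([], [], false)
  let tail := PySem.Chars.strip st.2.1
  if tail = [] then st.1 else st.1 ++ [String.ofList tail]

-- ===== PORT B =====
-- pass 1 step: toggle quote state / record an outside-quote semicolon index
def splitB_cut (st : Bool × List Int) (p : Int × Char) : Bool × List Int :=
  if p.2 = '\'' then (!st.1, st.2)
  else if p.2 = ';' ∧ st.1 = false then (st.1, st.2 ++ [p.1])
  else st

-- pass 2 step: slice sql[prev:idx] and advance prev to idx+1
def splitB_slice (cs : List Char) (st : Int × List (List Char)) (idx : Int) :
    Int × List (List Char) :=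
  (idx + 1, st.2 ++ [PySem.List.slice cs (some st.1) (some idx)])

def split_sql_alt (sql : String) : List String :=
  let cs := sql.toList
  let cuts := ((PySem.List.enumerate cs 0).foldl splitB_cut (false, [])).2
  let fin := cuts.foldl (splitB_slice cs) (0, [])
  let parts := fin.2 ++ [PySem.List.slice cs (some fin.1) none]
  parts.foldl (fun out p =>
    let s := PySem.Chars.strip p
    if s = [] then out else out ++ [String.ofList s]) []

-- ===== PRECONDITION & SPEC =====
def Spec_split_sql (sql : String) (out : List String) : Prop := out = split_sql_alt sql
instance (sql : String) (out : List String) : Decidable (Spec_split_sql sql out) := by unfold Spec_split_sql; infer_instance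

-- ===== CLAIM (what is proved, stated in full; the proofs are below) =====
def Claim_equal_split_sql : Prop := ∀ (sql : String), Dom_split_sql sql → Spec_split_sql sql (split_sql sql)

-- ===== LEMMAS AND PROOFS =====

-- the raw segments of cs between outside-quote semicolons (always nonempty)
def segs : List Char → Bool → List (List Char)
  | [], _ => [[]]
  | c :: cs, q =>
    let q' := if c = '\'' then !q else q
    if c = ';' ∧ q' = false then [] :: segs cs q'
    else match segs cs q' with
      | s :: r => (c :: s) :: r
      | [] => [[c]]

-- strip each segment, keep the nonempty ones
def emit : List (List Char) → List String
  | [] => []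
  | x :: r =>
    (if PySem.Chars.strip x = [] then [] else [String.ofList (PySem.Chars.strip x)]) ++ emit r

-- prepend a pending buffer to the first segment
def prepFirst (cur : List Char) : List (List Char) → List (List Char)
  | s :: r => (cur ++ s) :: r
  | [] => [cur]

-- the semicolon indices collected by B's first pass, as structural recursion
def cutsRec : List Char → Int → Bool → List Int
  | [], _, _ => []
  | c :: cs, i, q =>
    if c = '\'' then cutsRec cs (i + 1) (!q)
    else if c = ';' ∧ q = false then i :: cutsRec cs (i + 1) q
    else cutsRec cs (i + 1) q

-- quote state after reading cs
def qAfter : List Char → Bool → Bool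
  | [], q => q
  | c :: cs, q => qAfter cs (if c = '\'' then !q else q)

theorem segs_ne_nil (cs : List Char) (q : Bool) : segs cs q ≠ [] := by
  cases cs with
  | nil => simp [segs]
  | cons c cs =>
    simp only [segs]
    repeat' split
    all_goals simp

theorem segs_cons (cs : List Char) (q : Bool) : ∃ s r, segs cs q = s :: r := by
  cases h : segs cs q with
  | nil => exact absurd h (segs_ne_nil cs q)
  | cons s r => exact ⟨s, r, rfl⟩

-- A's fold, from any state, produces the emitted segments
theorem A_fold (cs : List Char) (stmts : List String) (cur : List Char) (q : Bool) :
    (let st := cs.foldl splitA_step (stmts, cur, q)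
     let tail := PySem.Chars.strip st.2.1
     if tail = [] then st.1 else st.1 ++ [String.ofList tail])
      = stmts ++ emit (prepFirst cur (segs cs q)) := by
  induction cs generalizing stmts cur q with
  | nil =>
    simp only [List.foldl_nil, segs, prepFirst, emit, List.append_nil]
    split <;> simp
  | cons c cs ih =>
    simp only [List.foldl_cons]
    set q' := if c = '\'' then !q else q with hq'
    by_cases hsc : c = ';' ∧ q' = false
    · obtain ⟨hc, hq0⟩ := hsc
      have hq : q = false := by rw [hq'] at hq0; subst hc; simpa using hq0
      have hstep : splitA_step (stmts, cur, q) c =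
        ((if PySem.Chars.strip cur = [] then stmts else stmts ++ [String.ofList (PySem.Chars.strip cur)]), [], false) := by
        subst hc hq; simp [splitA_step]
      rw [hstep, ih]
      obtain ⟨s, r, hsr⟩ := segs_cons cs false
      have hsegs : segs (c :: cs) q = [] :: segs cs false := by
        subst hc hq; simp [segs]
      rw [hsegs, hsr]
      simp only [prepFirst, List.nil_append, List.append_nil, emit]
      split <;> simp
    · have hstep : splitA_step (stmts, cur, q) c = (stmts, cur ++ [c], q') := by
        simp [splitA_step, hsc, ← hq']
      rw [hstep, ih]
      obtain ⟨s, r, hsr⟩ := segs_cons cs q'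
      have hsegs : segs (c :: cs) q = (c :: s) :: r := by
        simp only [segs, ← hq', if_neg hsc, hsr]
      rw [hsegs, hsr]
      simp [prepFirst]

-- B's first pass equals cutsRec
theorem B_pass1 (cs : List Char) (i : Int) (q : Bool) (acc : List Int) :
    (PySem.List.enumerate cs i).foldl splitB_cut (q, acc) = (qAfter cs q, acc ++ cutsRec cs i q) := by
  induction cs generalizing i q acc with
  | nil => simp [PySem.List.enumerate_nil, qAfter, cutsRec]
  | cons c cs ih =>
    rw [PySem.List.enumerate_cons, List.foldl_cons]
    by_cases hc : c = '\''
    · have hstep : splitB_cut (q, acc) (i, c) = (!q, acc) := by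
        simp [splitB_cut, hc]
      rw [hstep, ih]
      simp [qAfter, cutsRec, hc]
    · by_cases hsc : c = ';' ∧ q = false
      · have hstep : splitB_cut (q, acc) (i, c) = (q, acc ++ [i]) := by
          simp [splitB_cut, hsc.1, hsc.2]
        rw [hstep, ih]
        simp [qAfter, cutsRec, hsc.1, hsc.2]
      · have hstep : splitB_cut (q, acc) (i, c) = (q, acc) := by
          simp [splitB_cut, hc, hsc]
        rw [hstep, ih]
        simp [qAfter, cutsRec, hc, hsc]

-- take one more character of the pending slice
theorem take_drop_snoc (cs0 : List Char) (prev p : Nat) (c : Char) (cs : List Char)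
    (hdrop : cs0.drop p = c :: cs) (hle : prev ≤ p) :
    (cs0.drop prev).take (p + 1 - prev) = (cs0.drop prev).take (p - prev) ++ [c] := by
  have hget : (cs0.drop prev)[p - prev]? = some c := by
    rw [List.getElem?_drop]
    have hpp : prev + (p - prev) = p := by omega
    rw [hpp]
    have h0 : cs0[p]? = (cs0.drop p)[0]? := by rw [List.getElem?_drop]; norm_num
    rw [h0, hdrop]
    rfl
  have h1 : p + 1 - prev = (p - prev) + 1 := by omega
  rw [h1, List.take_add_one, hget]
  rfl

-- B's second pass rebuilds the segments by slicing
theorem B_pass2 (cs0 : List Char) (cs : List Char) (p prev : Nat) (q : Bool)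
    (ps : List (List Char)) (hdrop : cs0.drop p = cs) (hle : prev ≤ p) :
    (let f := (cutsRec cs (p : Int) q).foldl (splitB_slice cs0) ((prev : Int), ps)
     f.2 ++ [PySem.List.slice cs0 (some f.1) none])
      = ps ++ prepFirst ((cs0.drop prev).take (p - prev)) (segs cs q) := by
  induction cs generalizing p prev q ps with
  | nil =>
    have hlen : cs0.length ≤ p := by
      by_contra h
      have h2 := List.drop_eq_getElem_cons (l := cs0) (by omega : p < cs0.length)
      rw [hdrop] at h2; simp at h2; omega
    simp only [cutsRec, List.foldl_nil, segs, prepFirst, List.append_nil]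
    rw [PySem.List.slice_from_natCast]
    congr 2
    rw [List.take_of_length_le (by simp; omega)]
  | cons c cs ih =>
    have hdrop' : cs0.drop (p + 1) = cs := by
      rw [← List.drop_drop, hdrop]; rfl
    by_cases hc : c = '\''
    · -- quote: no cut, toggle
      have hcr : cutsRec (c :: cs) (p : Int) q = cutsRec cs ((p : Int) + 1) (!q) := by
        simp [cutsRec, hc]
      have hp1 : ((p : Int) + 1) = ((p + 1 : Nat) : Int) := by push_cast; ring
      rw [hcr, hp1]
      rw [ih (p + 1) prev (!q) ps hdrop' (by omega)]
      obtain ⟨s, r, hsr⟩ := segs_cons cs (!q)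
      have hsegs : segs (c :: cs) q = (c :: s) :: r := by
        simp [segs, hc, hsr]
      rw [hsegs, hsr]
      simp only [prepFirst]
      rw [take_drop_snoc cs0 prev p c cs hdrop hle]
      simp
    · by_cases hsc : c = ';' ∧ q = false
      · -- cut here
        have hcr : cutsRec (c :: cs) (p : Int) q = (p : Int) :: cutsRec cs ((p : Int) + 1) q := by
          simp [cutsRec, hsc]
        rw [hcr, List.foldl_cons]
        have hstep : splitB_slice cs0 ((prev : Int), ps) (p : Int) =
            ((p : Int) + 1, ps ++ [(cs0.drop prev).take (p - prev)]) := by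
          simp [splitB_slice, PySem.List.slice_natCast]
        have hp1 : ((p : Int) + 1) = ((p + 1 : Nat) : Int) := by push_cast; ring
        rw [hstep, hp1]
        rw [ih (p + 1) (p + 1) q (ps ++ [(cs0.drop prev).take (p - prev)]) hdrop' (le_refl _)]
        have hsegs : segs (c :: cs) q = [] :: segs cs q := by
          obtain ⟨hc', hq⟩ := hsc; subst hc' hq; simp [segs]
        rw [hsegs]
        obtain ⟨s, r, hsr⟩ := segs_cons cs q
        rw [hsr]
        simp [prepFirst]
      · -- ordinary char
        have hcr : cutsRec (c :: cs) (p : Int) q = cutsRec cs ((p : Int) + 1) q := by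
          simp [cutsRec, hc, hsc]
        have hp1 : ((p : Int) + 1) = ((p + 1 : Nat) : Int) := by push_cast; ring
        rw [hcr, hp1]
        rw [ih (p + 1) prev q ps hdrop' (by omega)]
        obtain ⟨s, r, hsr⟩ := segs_cons cs q
        have hsegs : segs (c :: cs) q = (c :: s) :: r := by
          have hq' : (if c = '\'' then !q else q) = q := by simp [hc]
          simp only [segs, hq']
          rw [if_neg hsc, hsr]
        rw [hsegs, hsr]
        simp only [prepFirst]
        rw [take_drop_snoc cs0 prev p c cs hdrop hle]
        simp

-- B's filter pass is emit
theorem B_filter (l : List (List Char)) (acc : List String) :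
    l.foldl (fun out p =>
      let s := PySem.Chars.strip p
      if s = [] then out else out ++ [String.ofList s]) acc = acc ++ emit l := by
  induction l generalizing acc with
  | nil => simp [emit]
  | cons x r ih => simp only [List.foldl_cons, emit, ih]; split <;> simp

-- ===== VERDICT (by name: the statement is the Claim_ definition above) =====
theorem split_sql_spec : Claim_equal_split_sql := by
  intro sql _
  show split_sql sql = split_sql_alt sql
  obtain ⟨s, r, hsr⟩ := segs_cons sql.toList false
  have hA : split_sql sql = emit (segs sql.toList false) := by
    have h := A_fold sql.toList [] [] false
    rw [hsr] at h
    simp only [prepFirst, List.nil_append] at h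
    rw [split_sql, h, hsr]
  have hB : split_sql_alt sql = emit (segs sql.toList false) := by
    have h1 : ((PySem.List.enumerate sql.toList 0).foldl splitB_cut (false, [])).2
        = cutsRec sql.toList 0 false := by
      rw [B_pass1]; simp
    have h2 := B_pass2 sql.toList sql.toList 0 0 false [] (by simp) (le_refl 0)
    rw [hsr] at h2
    simp only [Nat.cast_zero, List.drop_zero, prepFirst, List.nil_append] at h2
    rw [split_sql_alt]
    simp only [h1]
    rw [B_filter]
    rw [h2, hsr]
    simp
  rw [hA, hB]
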